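-- pv_equiv track=rewrite | github.com/SarthakKala/Alchemy | talk-to-data/backend/app/graph/nodes/query_coherence.py | _max_consonant_run
-- ===== SOURCE A (Python) =====
-- def _max_consonant_run(word: str) -> int:
--     vowels = frozenset("aeiouy")
--     run = max_run = 0
--     for c in word.lower():
--         if c.isalpha() and c not in vowels:
--             run += 1
--             max_run = max(max_run, run)
--         else:
--             run = 0
--     return max_run
-- ===== SOURCE B (Python) =====
-- def _max_consonant_run(word: str) -> int:
--     vowels = frozenset("aeiouy")
--     masked = "".join(
--         c if (c.isalpha() and c not in vowels) else " "
--         for c in word.lower()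
--     )
--     return max(map(len, masked.split()), default=0)
-- ===== Notes on version B (the rewrite author's own statement) =====
-- stated objective: alternative
-- what changed: Replaces A's running counter with reset by a staged mask-and-split pipeline: blank out every non-consonant, split the masked string on whitespace, and take the max chunk length (default 0).
import Mathlib
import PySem

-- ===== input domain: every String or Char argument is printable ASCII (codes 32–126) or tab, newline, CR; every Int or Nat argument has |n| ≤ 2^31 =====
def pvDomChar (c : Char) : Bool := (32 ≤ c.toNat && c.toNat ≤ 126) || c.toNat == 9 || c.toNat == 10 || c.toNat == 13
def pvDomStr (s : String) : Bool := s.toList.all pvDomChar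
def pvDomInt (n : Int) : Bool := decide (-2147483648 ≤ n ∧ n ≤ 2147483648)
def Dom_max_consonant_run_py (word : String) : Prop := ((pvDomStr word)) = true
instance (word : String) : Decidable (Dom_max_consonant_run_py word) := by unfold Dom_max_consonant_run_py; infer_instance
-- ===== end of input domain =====

-- B replaces A's running counter with reset by a staged mask-and-split pipeline:
-- blank out every non-consonant, split on whitespace, take the max chunk length (alternative, same cost).

-- ===== PORT A =====
def pvVowels : PySem.Set Char := PySem.Set.ofList "aeiouy".toList

def max_consonant_run_py (word : String) : Int :=
  ((PySem.Chars.lower word.toList).foldl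
    (fun (st : Int × Int) c =>
      if PySem.Chars.isalpha c && !(PySem.Set.contains pvVowels c) then
        (st.1 + 1, max st.2 (st.1 + 1))
      else (0, st.2)) ((0 : Int), (0 : Int))).2

-- ===== PORT B =====
def pvIsCons (c : Char) : Bool :=
  PySem.Chars.isalpha c && !(PySem.Set.contains pvVowels c)

-- masked = "".join(c if is_cons(c) else " " for c in word.lower());
-- return max(map(len, masked.split()), default=0)
def max_consonant_run_py_alt (word : String) : Int :=
  ((PySem.List.max?
      ((PySem.Chars.split₀
          ((PySem.Chars.lower word.toList).map (fun c => if pvIsCons c then c else ' '))).map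
        (fun chunk => (chunk.length : Int)))
      id).getD 0)

-- ===== PRECONDITION & SPEC =====
def Spec_max_consonant_run_py (word : String) (out : Int) : Prop := out = max_consonant_run_py_alt word
instance (word : String) (out : Int) : Decidable (Spec_max_consonant_run_py word out) := by unfold Spec_max_consonant_run_py; infer_instance

-- ===== CLAIM (what is proved, stated in full; the proofs are below) =====
def Claim_equal_max_consonant_run_py : Prop := ∀ (word : String), Dom_max_consonant_run_py word → Spec_max_consonant_run_py word (max_consonant_run_py word)

-- ===== LEMMAS AND PROOFS =====

-- equation lemmas for PySem.Chars.split₀.go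
theorem pvGo_nil (cur : List Char) (accs : List (List Char)) :
    PySem.Chars.split₀.go [] cur accs = (if cur.isEmpty then accs.reverse else (cur.reverse :: accs).reverse) := by
  rw [PySem.Chars.split₀.go]

theorem pvGo_cons (c : Char) (rest cur : List Char) (accs : List (List Char)) :
    PySem.Chars.split₀.go (c :: rest) cur accs =
      (if PySem.Chars.isspace c then
        (if cur.isEmpty then PySem.Chars.split₀.go rest [] accs
         else PySem.Chars.split₀.go rest [] (cur.reverse :: accs))
       else PySem.Chars.split₀.go rest (c :: cur) accs) := by
  rw [PySem.Chars.split₀.go]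

-- proof-only characterisation of A's fold: best run seen, starting with `run` pending
def pvH (run : Int) : List Char → Int
  | [] => run
  | c :: xs => if pvIsCons c then pvH (run + 1) xs else max run (pvH 0 xs)

theorem pvH_ge (xs : List Char) : ∀ run : Int, run ≤ pvH run xs := by
  induction xs with
  | nil => intro run; simp [pvH]
  | cons c xs ih =>
    intro run
    simp only [pvH]
    split
    · exact le_trans (by omega) (ih (run + 1))
    · exact le_max_left _ _

theorem pvFoldl_eq_pvH (xs : List Char) : ∀ run m : Int, 0 ≤ run → run ≤ m →
    (xs.foldl (fun (st : Int × Int) c =>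
      if PySem.Chars.isalpha c && !(PySem.Set.contains pvVowels c) then
        (st.1 + 1, max st.2 (st.1 + 1))
      else (0, st.2)) (run, m)).2 = max m (pvH run xs) := by
  induction xs with
  | nil => intro run m _ h; simp [pvH, max_eq_left h]
  | cons c xs ih =>
    intro run m hr h
    simp only [List.foldl_cons, pvH]
    by_cases hc : pvIsCons c
    · have hc' : (PySem.Chars.isalpha c && !(PySem.Set.contains pvVowels c)) = true := hc
      rw [if_pos hc', if_pos hc]
      have := ih (run + 1) (max m (run + 1)) (by omega) (le_max_right _ _)
      simp only at this
      rw [this]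
      have hge := pvH_ge xs (run + 1)
      rw [max_assoc, max_eq_right hge]
    · have hc' : ¬ ((PySem.Chars.isalpha c && !(PySem.Set.contains pvVowels c)) = true) := hc
      rw [if_neg hc', if_neg hc]
      have := ih 0 m le_rfl (le_trans hr h)
      simp only at this
      rw [this]
      rw [← max_assoc, max_eq_left h]

-- a consonant is an ASCII letter, hence never whitespace
theorem pvCons_not_space (c : Char) (h : pvIsCons c = true) : PySem.Chars.isspace c = false := by
  have ha : PySem.Chars.isalpha c = true := by
    simp only [pvIsCons, Bool.and_eq_true] at h; exact h.1
  simp only [PySem.Chars.isalpha, PySem.Chars.isupper, PySem.Chars.islower, Char.le_def,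
    Bool.or_eq_true, Bool.and_eq_true, decide_eq_true_eq, UInt32.le_iff_toNat_le] at ha
  have e1 : ('A' : Char).val.toNat = 65 := rfl
  have e2 : ('Z' : Char).val.toNat = 90 := rfl
  have e3 : ('a' : Char).val.toNat = 97 := rfl
  have e4 : ('z' : Char).val.toNat = 122 := rfl
  rw [e1, e2, e3, e4] at ha
  simp only [PySem.Chars.isspace, Char.toNat]
  simp only [Bool.or_eq_false_iff, Bool.and_eq_false_iff, decide_eq_false_iff_not]
  omega

-- split₀.go prepends the reversed accumulator
theorem pvGo_acc (m : List Char) : ∀ (cur : List Char) (accs : List (List Char)),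
    PySem.Chars.split₀.go m cur accs = accs.reverse ++ PySem.Chars.split₀.go m cur [] := by
  induction m with
  | nil =>
    intro cur accs
    rw [pvGo_nil, pvGo_nil]
    cases h : cur.isEmpty <;> simp [h]
  | cons c m ih =>
    intro cur accs
    rw [pvGo_cons, pvGo_cons]
    by_cases hs : PySem.Chars.isspace c = true
    · rw [if_pos hs, if_pos hs]
      cases h : cur.isEmpty with
      | true => rw [if_pos rfl, if_pos rfl]; exact ih [] accs
      | false =>
        rw [if_neg (by simp), if_neg (by simp)]
        rw [ih [] (cur.reverse :: accs), ih [] [cur.reverse]]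
        simp
    · rw [if_neg (by simp [hs]), if_neg (by simp [hs])]
      exact ih (c :: cur) accs

-- folding Int-max distributes over a max in the seed
theorem pvFoldlMax_seed (L : List Int) : ∀ s t : Int,
    L.foldl max (max s t) = max s (L.foldl max t) := by
  induction L with
  | nil => intro s t; rfl
  | cons a L ih =>
    intro s t
    simp only [List.foldl_cons, max_assoc]
    exact ih s (max t a)

-- PySem.List.max? on a nonempty Int list is the fold of max
theorem pvMaxq_cons (L : List Int) : ∀ a : Int, PySem.List.max? (a :: L) id = some (L.foldl max a) := by
  induction L with
  | nil => intro a; rfl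
  | cons b L ih =>
    intro a
    have step : PySem.List.max? (a :: b :: L) id = PySem.List.max? (max a b :: L) id := by
      simp only [PySem.List.max?, List.foldl_cons, id]
      by_cases h : a < b
      · rw [if_pos h, max_eq_right (le_of_lt h)]
      · rw [if_neg h, max_eq_left (by omega)]
    rw [step, ih (max a b)]
    simp [List.foldl_cons]

-- … hence max? with default 0 = foldl max 0 when the head is nonnegative
theorem pvMaxqD_eq_foldl (L : List Int) (hL : ∀ x ∈ L, 0 ≤ x) :
    (PySem.List.max? L id).getD 0 = L.foldl max 0 := by
  cases L with
  | nil => rfl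
  | cons a L =>
    have ha : 0 ≤ a := hL a (List.mem_cons_self ..)
    rw [pvMaxq_cons L a]
    simp only [Option.getD_some, List.foldl_cons]
    rw [show max (0 : Int) a = a from max_eq_right ha]

def pvMask (xs : List Char) : List Char := xs.map (fun c => if pvIsCons c then c else ' ')

theorem pvMask_nil : pvMask [] = [] := rfl

theorem pvMask_cons (c : Char) (xs : List Char) :
    pvMask (c :: xs) = (if pvIsCons c then c else ' ') :: pvMask xs := rfl

-- the masked chunk-length max, with reversed pending consonants `cur`, equals pvH cur.length
theorem pvGo_eq_pvH (xs : List Char) : ∀ cur : List Char,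
    (((PySem.Chars.split₀.go (pvMask xs) cur []).map (fun chunk => (chunk.length : Int))).foldl max 0)
      = pvH (cur.length : Int) xs := by
  induction xs with
  | nil =>
    intro cur
    rw [pvMask_nil, pvGo_nil]
    cases cur with
    | nil => simp [pvH]
    | cons a cur =>
      simp only [List.isEmpty_cons, Bool.false_eq_true, if_false, List.reverse_cons,
        List.reverse_nil, List.nil_append, List.map_cons, List.map_nil, List.foldl_cons,
        List.foldl_nil, pvH]
      rw [max_eq_right (by positivity)]
      simp
  | cons c xs ih =>
    intro cur
    rw [pvMask_cons]
    by_cases hc : pvIsCons c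
    · have hs := pvCons_not_space c hc
      rw [if_pos hc, pvGo_cons, if_neg (by simp [hs])]
      rw [ih (c :: cur)]
      simp only [pvH, if_pos hc, List.length_cons]
      push_cast
      ring_nf
    · have hs : PySem.Chars.isspace ' ' = true := by decide
      rw [if_neg hc, pvGo_cons, if_pos hs]
      cases cur with
      | nil =>
        rw [if_pos List.isEmpty_nil, ih []]
        simp only [pvH, if_neg hc, List.length_nil, Nat.cast_zero, Bool.false_eq_true, if_false]
        rw [max_eq_right (pvH_ge xs 0)]
      | cons a cur' =>
        rw [if_neg (by simp)]
        rw [pvGo_acc (pvMask xs) [] [(a :: cur').reverse]]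
        simp only [List.reverse_cons, List.reverse_nil, List.nil_append, List.singleton_append,
          List.map_cons, List.foldl_cons, List.length_append, List.length_reverse,
          List.length_cons, List.length_nil]
        rw [show max (0 : Int) ((cur'.length + 0 + 1 : Nat) : Int) = ((cur'.length + 0 + 1 : Nat) : Int) from
              max_eq_right (by positivity)]
        rw [show ((cur'.length + 0 + 1 : Nat) : Int) = max ((cur'.length + 0 + 1 : Nat) : Int) 0 from
              (max_eq_left (by positivity)).symm]
        rw [pvFoldlMax_seed, ih []]
        simp only [pvH, if_neg hc, List.length_cons, List.length_nil, Nat.cast_zero,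
          Bool.false_eq_true, if_false]
        push_cast
        ring_nf
        rw [show max (1 + (cur'.length : Int)) 0 = 1 + (cur'.length : Int) from
              max_eq_left (by positivity)]

-- ===== VERDICT (by name: the statement is the Claim_ definition above) =====
theorem max_consonant_run_py_spec : Claim_equal_max_consonant_run_py := by
  intro word _
  unfold Spec_max_consonant_run_py max_consonant_run_py max_consonant_run_py_alt
  rw [pvFoldl_eq_pvH _ 0 0 le_rfl le_rfl,
      max_eq_right (pvH_ge (PySem.Chars.lower word.toList) 0)]
  have hnn : ∀ x ∈ ((PySem.Chars.split₀
      ((PySem.Chars.lower word.toList).map (fun c => if pvIsCons c then c else ' '))).map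
        (fun chunk => (chunk.length : Int))), 0 ≤ x := by
    intro x hx
    simp only [List.mem_map] at hx
    obtain ⟨ch, _, rfl⟩ := hx
    positivity
  rw [pvMaxqD_eq_foldl _ hnn]
  have := pvGo_eq_pvH (PySem.Chars.lower word.toList) []
  simp only [pvMask, List.length_nil, Nat.cast_zero] at this
  exact this.symm
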